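-- pv_equiv track=rewrite | github.com/TohDeKai/AOC2024 | day2.py | is_safe_sequence
-- ===== SOURCE A (Python) =====
-- def is_safe_sequence(level):
--     # Checks if a sequence of levels is safe without removal of any level
--     n = len(level)
--     if n <= 1:
--         return True
--
--     # Check whether the sequence is increasing or decreasing
--     if level[0] < level[1]:
--         increasing = True
--     elif level[0] > level[1]:
--         increasing = False
--     else:
--         return False
--
--     pointer = 1
--     while pointer < n:
--         if abs(level[pointer] - level[pointer-1]) < 1 or abs(level[pointer] - level[pointer-1]) > 3:
--             return False
--         if increasing:
--             if level[pointer] < level[pointer-1]: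
--                 return False
--         else:
--             if level[pointer] > level[pointer-1]:
--                 return False
--         pointer += 1
--     return True
-- ===== SOURCE B (Python) =====
-- def is_safe_sequence(level):
--     # Simpler: table of consecutive differences, then one predicate per direction.
--     diffs = [b - a for a, b in zip(level, level[1:])]
--     return all(1 <= d <= 3 for d in diffs) or all(-3 <= d <= -1 for d in diffs)
-- ===== Notes on version B (the rewrite author's own statement) =====
-- stated objective: simpler
-- what changed: Replaces the stateful direction-flag pointer loop with a list of consecutive differences tested by two all() range predicates (empty/short input handled by vacuous all()).
import Mathlib
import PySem

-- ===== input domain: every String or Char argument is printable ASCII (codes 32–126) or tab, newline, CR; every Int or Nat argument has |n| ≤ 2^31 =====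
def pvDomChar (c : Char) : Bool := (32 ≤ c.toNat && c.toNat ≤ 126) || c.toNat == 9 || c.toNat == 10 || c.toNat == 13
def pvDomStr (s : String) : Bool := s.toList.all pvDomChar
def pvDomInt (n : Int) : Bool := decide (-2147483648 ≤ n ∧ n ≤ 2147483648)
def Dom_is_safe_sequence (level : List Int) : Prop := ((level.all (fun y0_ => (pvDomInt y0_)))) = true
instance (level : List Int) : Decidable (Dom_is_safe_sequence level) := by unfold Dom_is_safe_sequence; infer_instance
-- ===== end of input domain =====

-- B replaces A's direction-flag pointer loop with a list of consecutive differences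
-- tested by two range predicates (objective: simpler).

-- ===== PORT A =====
-- the while loop of A; indices are in range whenever used, so getD is exact here
def isSafeLoop (level : List Int) (increasing : Bool) (pointer : Nat) : Bool :=
  if pointer < level.length then
    if (level.getD pointer 0 - level.getD (pointer-1) 0).natAbs < 1 ∨
       (level.getD pointer 0 - level.getD (pointer-1) 0).natAbs > 3 then false
    else if increasing then
      if level.getD pointer 0 < level.getD (pointer-1) 0 then false
      else isSafeLoop level increasing (pointer+1)
    else
      if level.getD pointer 0 > level.getD (pointer-1) 0 then false
      else isSafeLoop level increasing (pointer+1)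
  else true
termination_by level.length - pointer

def is_safe_sequence (level : List Int) : Bool :=
  let n := level.length
  if n ≤ 1 then true
  else if level.getD 0 0 < level.getD 1 0 then isSafeLoop level true 1
  else if level.getD 0 0 > level.getD 1 0 then isSafeLoop level false 1
  else false

-- ===== PORT B =====
def is_safe_sequence_alt (level : List Int) : Bool :=
  let diffs := List.zipWith (fun a b => b - a) level (level.drop 1)
  diffs.all (fun d => 1 ≤ d && d ≤ 3) || diffs.all (fun d => -3 ≤ d && d ≤ -1)

-- ===== PRECONDITION & SPEC =====
def Spec_is_safe_sequence (level : List Int) (out : Bool) : Prop := out = is_safe_sequence_alt level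
instance (level : List Int) (out : Bool) : Decidable (Spec_is_safe_sequence level out) := by unfold Spec_is_safe_sequence; infer_instance

-- ===== CLAIM (what is proved, stated in full; the proofs are below) =====
def Claim_equal_is_safe_sequence : Prop := ∀ (level : List Int), Dom_is_safe_sequence level → Spec_is_safe_sequence level (is_safe_sequence level)

-- ===== LEMMAS AND PROOFS =====

-- one direction of A's loop, expressed structurally on the list
def chain (inc : Bool) : List Int → Bool
  | x :: y :: r =>
    if (y - x).natAbs < 1 ∨ (y - x).natAbs > 3 then false
    else if inc then (if y < x then false else chain inc (y :: r))
    else (if y > x then false else chain inc (y :: r))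
  | _ => true

lemma chain_short (inc : Bool) (l : List Int) (h : l.length ≤ 1) : chain inc l = true := by
  match l, h with
  | [], _ => rfl
  | [x], _ => rfl

lemma loop_eq_chain (k : Nat) : ∀ (l : List Int) (inc : Bool) (p : Nat),
    l.length ≤ p + k → 1 ≤ p → isSafeLoop l inc p = chain inc (l.drop (p - 1)) := by
  induction k with
  | zero =>
    intro l inc p hk hp
    rw [isSafeLoop]
    have hlen : ¬ p < l.length := by omega
    rw [if_neg hlen, chain_short]
    simp; omega
  | succ k ih =>
    intro l inc p hk hp
    by_cases hlt : p < l.length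
    · have h1 : p - 1 < l.length := by omega
      have hd1 : l.drop (p - 1) = l[p-1] :: l.drop ((p-1)+1) := List.drop_eq_getElem_cons h1
      have hpp : (p - 1) + 1 = p := by omega
      have hd2 : l.drop p = l[p] :: l.drop (p+1) := List.drop_eq_getElem_cons hlt
      rw [hpp] at hd1
      have hgd1 : l.getD (p-1) 0 = l[p-1] := List.getD_eq_getElem l 0 h1
      have hgd2 : l.getD p 0 = l[p] := List.getD_eq_getElem l 0 hlt
      have hrec := ih l inc (p+1) (by omega) (by omega)
      simp only [Nat.add_sub_cancel] at hrec
      rw [isSafeLoop, if_pos hlt, hd1, hd2, chain, hgd1, hgd2, hrec, hd2]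
    · rw [isSafeLoop, if_neg hlt, chain_short]
      simp; omega

lemma chain_true_eq (l : List Int) :
    chain true l = (List.zipWith (fun a b => b - a) l (l.drop 1)).all (fun d => 1 ≤ d && d ≤ 3) := by
  induction l with
  | nil => rfl
  | cons x t ih =>
    cases t with
    | nil => rfl
    | cons y r =>
      simp only [chain, reduceIte, Bool.false_eq_true, if_false, if_true, List.drop_succ_cons, List.drop_zero, List.zipWith_cons_cons,
        List.all_cons] at *
      rw [← ih]
      split_ifs with h1 h2
      · have hf : (decide (1 ≤ y - x) && decide (y - x ≤ 3)) = false := by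
          simp; omega
        rw [hf, Bool.false_and]
      · have hf : (decide (1 ≤ y - x) && decide (y - x ≤ 3)) = false := by
          simp; omega
        rw [hf, Bool.false_and]
      · have ht : (decide (1 ≤ y - x) && decide (y - x ≤ 3)) = true := by
          simp; omega
        rw [ht, Bool.true_and]

lemma chain_false_eq (l : List Int) :
    chain false l = (List.zipWith (fun a b => b - a) l (l.drop 1)).all (fun d => -3 ≤ d && d ≤ -1) := by
  induction l with
  | nil => rfl
  | cons x t ih =>
    cases t with
    | nil => rfl
    | cons y r =>
      simp only [chain, reduceIte, Bool.false_eq_true, if_false, if_true, List.drop_succ_cons, List.drop_zero, List.zipWith_cons_cons,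
        List.all_cons] at *
      rw [← ih]
      split_ifs with h1 h2
      · have hf : (decide (-3 ≤ y - x) && decide (y - x ≤ -1)) = false := by
          simp; omega
        rw [hf, Bool.false_and]
      · have hf : (decide (-3 ≤ y - x) && decide (y - x ≤ -1)) = false := by
          simp; omega
        rw [hf, Bool.false_and]
      · have ht : (decide (-3 ≤ y - x) && decide (y - x ≤ -1)) = true := by
          simp; omega
        rw [ht, Bool.true_and]

-- ===== VERDICT (by name: the statement is the Claim_ definition above) =====
theorem is_safe_sequence_spec : Claim_equal_is_safe_sequence := by
  intro level _
  unfold Spec_is_safe_sequence is_safe_sequence is_safe_sequence_alt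
  match level with
  | [] => rfl
  | [x] => rfl
  | x :: y :: r =>
    have hloop : ∀ inc, isSafeLoop (x :: y :: r) inc 1 = chain inc (x :: y :: r) := by
      intro inc
      have := loop_eq_chain ((x :: y :: r).length) (x :: y :: r) inc 1 (by omega) (by omega)
      simpa using this
    simp only [List.length_cons, List.getD_cons_zero, List.getD_cons_succ,
      List.drop_succ_cons, List.drop_zero, List.zipWith_cons_cons, List.all_cons]
    have hup := chain_true_eq (x :: y :: r)
    have hdown := chain_false_eq (x :: y :: r)
    simp only [List.drop_succ_cons, List.drop_zero, List.zipWith_cons_cons, List.all_cons] at hup hdown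
    split_ifs with h0 h1 h2
    · omega
    · -- x < y : downward all fails on the first diff
      rw [hloop, hup]
      have : ¬ (-3 ≤ y - x ∧ y - x ≤ -1) := by omega
      simp [this]
      omega
    · -- x > y : upward all fails on the first diff
      rw [hloop, hdown]
      have : ¬ (1 ≤ y - x ∧ y - x ≤ 3) := by omega
      simp [this]
      omega
    · -- x = y : both alls fail on the first diff (d = 0)
      have hxy : y - x = 0 := by omega
      simp [hxy]
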